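-- pv_equiv track=rewrite | github.com/LaurentClaessens/mazhe | create_bbl.py | get_bibtex_lines
-- ===== SOURCE A (Python) =====
-- def get_bibtex_lines(bibtex_lines, label):
--     found = False
--     lines = []
--     for line in bibtex_lines:
--         if found:
--             if line.startswith("@"):
--                 return lines
--             lines.append(line)
--         if label not in line:
--             continue
--         found = True
--
--     if found:
--         return lines
-- ===== SOURCE B (Python) =====
-- def get_bibtex_lines(bibtex_lines, label):
--     starts = [i for i, line in enumerate(bibtex_lines) if label in line]
--     if not starts:
--         return None
--     tail = bibtex_lines[starts[0] + 1:]
--     stops = [j for j, line in enumerate(tail) if line.startswith("@")]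
--     return tail[:stops[0]] if stops else tail
-- ===== Notes on version B (the rewrite author's own statement) =====
-- stated objective: alternative
-- what changed: Replaced the flag-driven streaming accumulator with an index-and-slice formulation: compute the list of match indices by comprehension, slice the original list after the first match, compute the '@' indices of that tail by a second comprehension, and return a slice up to the first such index.
-- outside the precondition, e.g. on get_bibtex_lines(['@a{x,', 't'], 'zzz'): A returns None, B returns None
import Mathlib
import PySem

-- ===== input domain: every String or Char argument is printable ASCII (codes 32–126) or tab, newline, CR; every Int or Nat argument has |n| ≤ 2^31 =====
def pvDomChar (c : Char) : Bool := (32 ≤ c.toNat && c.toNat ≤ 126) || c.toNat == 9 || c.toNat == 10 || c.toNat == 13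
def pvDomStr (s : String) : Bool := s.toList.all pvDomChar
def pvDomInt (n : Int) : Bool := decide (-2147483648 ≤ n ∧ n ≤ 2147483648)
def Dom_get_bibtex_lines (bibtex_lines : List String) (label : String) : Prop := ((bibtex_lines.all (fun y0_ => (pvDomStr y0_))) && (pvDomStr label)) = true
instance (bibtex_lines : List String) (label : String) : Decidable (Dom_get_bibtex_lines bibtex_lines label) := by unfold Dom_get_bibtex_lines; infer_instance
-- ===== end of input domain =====

-- B replaces A's flag-driven streaming accumulator by an index-and-slice formulation
-- (comprehensions over enumerate + two slices); alternative decomposition, same cost.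
-- Python A returns None (not a list) when the label occurs in no line; Pre_ excludes exactly those inputs.


-- ===== PORT A =====
-- the for-loop over bibtex_lines with its (found, lines) state; none = Python's fall-through `return None`
def pvLoopA (label : String) : List String → Bool → List String → Option (List String)
  | [], found, lines => if found then some lines else none
  | line :: rest, found, lines =>
    if found then
      if PySem.Str.startswith line "@" then some lines
      else
        let lines := lines ++ [line]
        let found := if PySem.Str.isIn label line then true else found
        pvLoopA label rest found lines
    else
      let found := if PySem.Str.isIn label line then true else found
      pvLoopA label rest found lines

def get_bibtex_lines (bibtex_lines : List String) (label : String) : List String :=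
  (pvLoopA label bibtex_lines false []).getD []      -- Pre_ guarantees the loop returns a list (Python's None case is excluded)

-- ===== PORT B =====
-- the two comprehensions of Source B: [i for i, line in enumerate(..) if label in line] and
-- [j for j, line in enumerate(tail) if line.startswith("@")]
def pvStarts (label : String) (bibtex_lines : List String) : List Int :=
  (PySem.List.enumerate bibtex_lines 0).filterMap
    (fun p => if PySem.Str.isIn label p.2 then some p.1 else none)

def pvStops (tail : List String) : List Int :=
  (PySem.List.enumerate tail 0).filterMap
    (fun p => if PySem.Str.startswith p.2 "@" then some p.1 else none)

def pvTailPart (tail : List String) : List String :=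
  match pvStops tail with
  | [] => tail
  | j :: _ => PySem.List.slice tail none (some j)

def get_bibtex_lines_alt (bibtex_lines : List String) (label : String) : List String :=
  match pvStarts label bibtex_lines with
  | [] => []      -- Python B returns None here; excluded by Pre_
  | i :: _ => pvTailPart (PySem.List.slice bibtex_lines (some (i + 1)) none)

-- ===== PRECONDITION & SPEC =====
-- Pre_ excludes inputs where no line contains the label: there Python A (and B) return None, not a list.
def Pre_get_bibtex_lines (bibtex_lines : List String) (label : String) : Prop :=
  ∃ line ∈ bibtex_lines, PySem.Str.isIn label line = true
instance (bibtex_lines : List String) (label : String) : Decidable (Pre_get_bibtex_lines bibtex_lines label) := by unfold Pre_get_bibtex_lines; infer_instance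
def pvWitness_get_bibtex_lines : List String × String := (["@a{x,", "title", "@b{y,"], "x")

def Spec_get_bibtex_lines (bibtex_lines : List String) (label : String) (out : List String) : Prop := out = get_bibtex_lines_alt bibtex_lines label
instance (bibtex_lines : List String) (label : String) (out : List String) : Decidable (Spec_get_bibtex_lines bibtex_lines label out) := by unfold Spec_get_bibtex_lines; infer_instance

-- ===== CLAIM (what is proved, stated in full; the proofs are below) =====
def Claim_equal_get_bibtex_lines : Prop := ∀ (bibtex_lines : List String) (label : String), Dom_get_bibtex_lines bibtex_lines label → Pre_get_bibtex_lines bibtex_lines label → Spec_get_bibtex_lines bibtex_lines label (get_bibtex_lines bibtex_lines label)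

-- ===== LEMMAS AND PROOFS =====

-- proof-side recursive characterisations of both programs
def pvSkip (label : String) : List String → Option (List String)
  | [] => none
  | line :: rest => if PySem.Str.isIn label line then some rest else pvSkip label rest

def pvGather : List String → List String
  | [] => []
  | line :: rest => if PySem.Str.startswith line "@" then [] else line :: pvGather rest

-- once found, A's loop appends every line up to the next "@", i.e. exactly pvGather
theorem pvLoopA_found (label : String) (ls : List String) :
    ∀ acc, pvLoopA label ls true acc = some (acc ++ pvGather ls) := by
  induction ls with
  | nil => intro acc; simp [pvLoopA, pvGather]
  | cons line rest ih =>
    intro acc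
    by_cases h : PySem.Chars.startswith line.toList ['@'] = true
    · simp [pvLoopA, pvGather, h]
    · simp [pvLoopA, pvGather, h, ih]

-- before the label is found, A's loop behaves as pvSkip followed by the found-phase
theorem pvLoopA_eq_skip_gather (label : String) (ls : List String) :
    pvLoopA label ls false [] =
      match pvSkip label ls with
      | none => none
      | some rest => some (pvGather rest) := by
  induction ls with
  | nil => simp [pvLoopA, pvSkip]
  | cons line rest ih =>
    by_cases h : PySem.Chars.isIn label.toList line.toList = true
    · simp [pvLoopA, pvSkip, h, pvLoopA_found]
    · simp [pvLoopA, pvSkip, h, ih]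

-- B's first comprehension, started at offset s, versus pvSkip
theorem pvStarts_spec (label : String) (ls : List String) : ∀ s : Nat,
    ((PySem.List.enumerate ls (s : Int)).filterMap
        (fun p => if PySem.Str.isIn label p.2 then some p.1 else none) = []
      ∧ pvSkip label ls = none)
    ∨ (∃ (k : Nat) (t : List Int),
        (PySem.List.enumerate ls (s : Int)).filterMap
          (fun p => if PySem.Str.isIn label p.2 then some p.1 else none)
          = (((s + k : Nat) : Int)) :: t
        ∧ pvSkip label ls = some (ls.drop (k + 1))) := by
  induction ls with
  | nil => intro s; left; simp [PySem.List.enumerate_nil, pvSkip]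
  | cons line rest ih =>
    intro s
    rw [PySem.List.enumerate_cons, List.filterMap_cons]
    by_cases h : PySem.Str.isIn label line = true
    · right
      rw [if_pos h]
      refine ⟨0, _, rfl, ?_⟩
      simp only [pvSkip]
      rw [if_pos h]
      rfl
    · rw [if_neg h]
      have hs : ((s : Int) + 1) = ((s + 1 : Nat) : Int) := by push_cast; ring
      rw [hs]
      rcases ih (s + 1) with ⟨h1, h2⟩ | ⟨k, t, h1, h2⟩
      · left
        refine ⟨h1, ?_⟩
        simp only [pvSkip]
        rw [if_neg h]
        exact h2
      · right
        refine ⟨k + 1, t, ?_, ?_⟩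
        · rw [h1, show s + 1 + k = s + (k + 1) from by omega]
        · simp only [pvSkip]
          rw [if_neg h]
          exact h2

-- B's second comprehension, started at offset s, versus pvGather
theorem pvStops_spec (ls : List String) : ∀ s : Nat,
    ((PySem.List.enumerate ls (s : Int)).filterMap
        (fun p => if PySem.Str.startswith p.2 "@" then some p.1 else none) = []
      ∧ pvGather ls = ls)
    ∨ (∃ (k : Nat) (t : List Int),
        (PySem.List.enumerate ls (s : Int)).filterMap
          (fun p => if PySem.Str.startswith p.2 "@" then some p.1 else none)
          = (((s + k : Nat) : Int)) :: t
        ∧ pvGather ls = ls.take k) := by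
  induction ls with
  | nil => intro s; left; simp [PySem.List.enumerate_nil, pvGather]
  | cons line rest ih =>
    intro s
    rw [PySem.List.enumerate_cons, List.filterMap_cons]
    by_cases h : PySem.Str.startswith line "@" = true
    · right
      rw [if_pos h]
      refine ⟨0, _, rfl, ?_⟩
      simp only [pvGather]
      rw [if_pos h]
      rfl
    · rw [if_neg h]
      have hs : ((s : Int) + 1) = ((s + 1 : Nat) : Int) := by push_cast; ring
      rw [hs]
      rcases ih (s + 1) with ⟨h1, h2⟩ | ⟨k, t, h1, h2⟩
      · left
        refine ⟨h1, ?_⟩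
        simp only [pvGather]
        rw [if_neg h, h2]
      · right
        refine ⟨k + 1, t, ?_, ?_⟩
        · rw [h1, show s + 1 + k = s + (k + 1) from by omega]
        · simp only [pvGather]
          rw [if_neg h, h2, List.take_succ_cons]

-- B computed via the recursive characterisation
theorem alt_eq_skip_gather (bibtex_lines : List String) (label : String) :
    get_bibtex_lines_alt bibtex_lines label =
      match pvSkip label bibtex_lines with
      | none => []
      | some rest => pvGather rest := by
  unfold get_bibtex_lines_alt pvStarts
  rcases pvStarts_spec label bibtex_lines 0 with ⟨h1, h2⟩ | ⟨k, t, h1, h2⟩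
  · rw [Nat.cast_zero] at h1
    simp only [h1, h2]
  · rw [Nat.zero_add] at h1
    rw [Nat.cast_zero] at h1
    simp only [h1, h2]
    have hidx : ((k : Nat) : Int) + 1 = ((k + 1 : Nat) : Int) := by push_cast; ring
    rw [hidx, PySem.List.slice_from_natCast]
    unfold pvTailPart pvStops
    rcases pvStops_spec (bibtex_lines.drop (k + 1)) 0 with ⟨g1, g2⟩ | ⟨j, t', g1, g2⟩
    · rw [Nat.cast_zero] at g1
      simp only [g1, g2]
    · rw [Nat.zero_add] at g1
      rw [Nat.cast_zero] at g1
      simp only [g1, g2]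
      rw [PySem.List.slice_to_natCast]

-- ===== VERDICT (by name: the statement is the Claim_ definition above) =====
theorem get_bibtex_lines_spec : Claim_equal_get_bibtex_lines := by
  intro bibtex_lines label _ _
  unfold Spec_get_bibtex_lines get_bibtex_lines
  rw [alt_eq_skip_gather, pvLoopA_eq_skip_gather]
  cases pvSkip label bibtex_lines <;> simp
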